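-- pv_equiv track=rewrite | github.com/asakti47/Idiom-Identification-NLP | aho_corasick_word2vec.py | neighbor_strings
-- ===== SOURCE A (Python) =====
-- import string
--
-- NEIGHBOR_STRING_COUNT = 10
--
-- def neighbor_strings(original, idx, direction):
--     curr = ""
--     results = []
--     while idx >= 0 and idx < len(original):
--         if original[idx] in string.whitespace:
--             if len(curr) > 0:
--                 if direction == -1:
--                     curr = curr[::-1]
--                 results.append(curr)
--                 curr = ""
--                 if len(results) >= NEIGHBOR_STRING_COUNT:
--                     break
--         elif original[idx] in string.ascii_letters or original[idx] in string.digits: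
--             curr += original[idx]
--
--         idx += direction
--
--     if len(curr) > 0 and len(results) < NEIGHBOR_STRING_COUNT:
--         if direction == -1:
--             curr = curr[::-1]
--         results.append(curr)
--
--     return results
-- ===== SOURCE B (Python) =====
-- import string
--
-- NEIGHBOR_STRING_COUNT = 10
--
-- def neighbor_strings(original, idx, direction):
--     if idx < 0 or idx >= len(original):
--         return []
--     stop = len(original) if direction > 0 else -1
--     seg = [original[i] for i in range(idx, stop, direction)]
--     keep = string.ascii_letters + string.digits
--     filtered = "".join(
--         c if c in keep else " " if c in string.whitespace else "" for c in seg
--     )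
--     words = filtered.split()[:NEIGHBOR_STRING_COUNT]
--     if direction == -1:
--         words = [w[::-1] for w in words]
--     return words
-- ===== Notes on version B (the rewrite author's own statement) =====
-- stated objective: simpler
-- what changed: A assembles words character by character in a stateful while loop with manual break-at-10 bookkeeping; B extracts the scanned segment once via range indexing, filters it to alphanumerics (whitespace mapped to a separator, punctuation dropped), and gets the words with str.split()[:10], reversing each word only for direction == -1.
import Mathlib
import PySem

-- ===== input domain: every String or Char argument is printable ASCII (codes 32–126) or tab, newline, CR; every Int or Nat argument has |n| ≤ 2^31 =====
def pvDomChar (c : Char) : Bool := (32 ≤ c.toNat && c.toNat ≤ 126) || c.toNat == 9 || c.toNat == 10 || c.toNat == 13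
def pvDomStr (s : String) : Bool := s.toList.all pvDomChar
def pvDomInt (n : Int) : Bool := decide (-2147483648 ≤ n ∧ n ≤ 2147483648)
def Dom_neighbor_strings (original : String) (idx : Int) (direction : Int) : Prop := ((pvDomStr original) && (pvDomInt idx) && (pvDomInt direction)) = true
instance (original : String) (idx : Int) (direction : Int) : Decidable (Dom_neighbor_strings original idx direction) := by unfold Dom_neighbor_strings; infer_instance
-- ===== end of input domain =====

-- B replaces A's character-at-a-time while loop (manual word assembly with a break at 10 words)
-- by slicing the scanned segment out once, filtering it to alphanumerics/whitespace, and splitting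
-- it with str.split(); objective: simpler.

-- ===== PORT A =====
-- `c in string.whitespace` (" \t\n\r\x0b\x0c"); exact: membership tested per code point
def nbIsWs (c : Char) : Bool :=
  c.toNat == 32 || c.toNat == 9 || c.toNat == 10 || c.toNat == 13 || c.toNat == 11 || c.toNat == 12

-- `c in string.ascii_letters or c in string.digits`; exact: those strings are A-Z, a-z, 0-9
def nbIsAlnum (c : Char) : Bool :=
  (65 ≤ c.toNat && c.toNat ≤ 90) || (97 ≤ c.toNat && c.toNat ≤ 122) || (48 ≤ c.toNat && c.toNat ≤ 57)

-- the code after the while loop (curr[::-1] is reversal, cf. PySem slice?_none_none_neg_one)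
def nbFinish (direction : Int) (curr : List Char) (results : List String) : List String :=
  if 0 < curr.length ∧ results.length < 10 then
    results ++ [String.mk (if direction = -1 then curr.reverse else curr)]
  else results

-- the while loop; fuel bounds the iteration count (≤ len(original) whenever direction ≠ 0,
-- see nbLoop_eq_procA/visit below; Python diverges exactly where Pre_ fails)
def nbLoop (s : List Char) (direction : Int) : Nat → Int → List Char → List String → List String
  | 0, _, curr, results => nbFinish direction curr results
  | fuel + 1, idx, curr, results =>
    if 0 ≤ idx ∧ idx < (s.length : Int) then
      match PySem.List.pyGet? s idx with
      | none => nbFinish direction curr results   -- unreachable: idx is in range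
      | some c =>
        if nbIsWs c then
          if 0 < curr.length then
            let curr' := if direction = -1 then curr.reverse else curr
            let results' := results ++ [String.mk curr']
            if 10 ≤ results'.length then results'   -- break (curr is "" afterwards, final if is a no-op)
            else nbLoop s direction fuel (idx + direction) [] results'
          else nbLoop s direction fuel (idx + direction) curr results
        else if nbIsAlnum c then nbLoop s direction fuel (idx + direction) (curr ++ [c]) results
        else nbLoop s direction fuel (idx + direction) curr results
    else nbFinish direction curr results

def neighbor_strings (original : String) (idx : Int) (direction : Int) : List String :=
  nbLoop original.toList direction (original.toList.length + 1) idx [] []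

-- ===== PORT B =====
-- `c if c in keep else " " if c in string.whitespace else ""`
def nbClassify (c : Char) : List Char :=
  if nbIsAlnum c then [c] else if nbIsWs c then [' '] else []

def neighbor_strings_alt (original : String) (idx : Int) (direction : Int) : List String :=
  let s := original.toList
  if 0 ≤ idx ∧ idx < (s.length : Int) then
    let stop : Int := if 0 < direction then (s.length : Int) else -1
    -- [original[i] for i in range(idx, stop, direction)]; every i is in range, pyGet? is exact
    let seg := (PySem.List.pyRange idx stop direction).filterMap (fun i => PySem.List.pyGet? s i)
    let filtered := seg.flatMap nbClassify
    let words := (PySem.Chars.split₀ filtered).take 10   -- filtered.split()[:10]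
    if direction = -1 then words.map (fun w => String.mk w.reverse) else words.map String.mk
  else []

-- ===== PRECONDITION & SPEC =====
-- Pre_ excludes exactly direction = 0 with idx in range: there Python A never leaves the
-- while loop (idx never changes) and diverges, so A returns on no such input.
def Pre_neighbor_strings (original : String) (idx : Int) (direction : Int) : Prop :=
  direction = 0 → ¬ (0 ≤ idx ∧ idx < (original.toList.length : Int))
instance (original : String) (idx : Int) (direction : Int) : Decidable (Pre_neighbor_strings original idx direction) := by unfold Pre_neighbor_strings; infer_instance

def pvWitness_neighbor_strings : String × Int × Int := ("to be, or not to be", 5, 1)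

def Spec_neighbor_strings (original : String) (idx : Int) (direction : Int) (out : List String) : Prop := out = neighbor_strings_alt original idx direction
instance (original : String) (idx : Int) (direction : Int) (out : List String) : Decidable (Spec_neighbor_strings original idx direction out) := by unfold Spec_neighbor_strings; infer_instance

-- ===== CLAIM (what is proved, stated in full; the proofs are below) =====
def Claim_equal_neighbor_strings : Prop := ∀ (original : String) (idx : Int) (direction : Int), Dom_neighbor_strings original idx direction → Pre_neighbor_strings original idx direction → Spec_neighbor_strings original idx direction (neighbor_strings original idx direction)

-- ===== LEMMAS AND PROOFS =====

-- the characters A's loop visits, fuel-indexed exactly like the loop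
def nbVisit (s : List Char) (d : Int) : Nat → Int → List Char
  | 0, _ => []
  | fuel + 1, idx =>
    if 0 ≤ idx ∧ idx < (s.length : Int) then
      match PySem.List.pyGet? s idx with
      | none => []
      | some c => c :: nbVisit s d fuel (idx + d)
    else []

-- A's loop body as a pure scan over the visited characters
def nbProc (d : Int) : List Char → List Char → List String → List String
  | [], curr, results => nbFinish d curr results
  | c :: cs, curr, results =>
    if nbIsWs c then
      if 0 < curr.length then
        let results' := results ++ [String.mk (if d = -1 then curr.reverse else curr)]
        if 10 ≤ results'.length then results'
        else nbProc d cs [] results'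
      else nbProc d cs curr results
    else if nbIsAlnum c then nbProc d cs (curr ++ [c]) results
    else nbProc d cs curr results

-- words of a character list, with a pending partial word, under A's classification
def nbW : List Char → List Char → List (List Char)
  | curr, [] => if curr = [] then [] else [curr]
  | curr, c :: cs =>
    if nbIsWs c then (if curr = [] then nbW [] cs else curr :: nbW [] cs)
    else if nbIsAlnum c then nbW (curr ++ [c]) cs
    else nbW curr cs

def nbFin (d : Int) (w : List Char) : String := String.mk (if d = -1 then w.reverse else w)

lemma nbLoop_eq_nbProc (s : List Char) (d : Int) :
    ∀ (fuel : Nat) (idx : Int) (curr : List Char) (results : List String),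
      nbLoop s d fuel idx curr results = nbProc d (nbVisit s d fuel idx) curr results := by
  intro fuel
  induction fuel with
  | zero => intro idx curr results; simp [nbLoop, nbVisit, nbProc]
  | succ fuel ih =>
    intro idx curr results
    by_cases h : 0 ≤ idx ∧ idx < (s.length : Int)
    · simp only [nbLoop, nbVisit, if_pos h]
      cases hg : PySem.List.pyGet? s idx with
      | none => simp [nbProc]
      | some c =>
        simp only [nbProc]
        by_cases hws : nbIsWs c
        · by_cases hc : 0 < curr.length
          · simp only [if_pos hws, if_pos hc]
            split_ifs <;> first | rfl | exact ih _ _ _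
          · simp [hws, hc, ih]
        · by_cases hal : nbIsAlnum c
          · simp [hws, hal, ih]
          · simp [hws, hal, ih]
    · simp [nbLoop, nbVisit, if_neg h, nbProc]

-- pyRange with a general step, unfolded one element at a time
lemma nbPyRange_nil_pos (a b st : Int) (hst : 0 < st) (h : b ≤ a) :
    PySem.List.pyRange a b st = [] := by
  simp [PySem.List.pyRange, hst.ne', if_pos hst, if_neg (not_lt.mpr h)]

lemma nbPyRange_nil_neg (a b st : Int) (hst : st < 0) (h : a ≤ b) :
    PySem.List.pyRange a b st = [] := by
  simp [PySem.List.pyRange, hst.ne, if_neg (not_lt.mpr hst.le), if_neg (not_lt.mpr h)]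

lemma nbCount_succ (x st : Int) (hst : 0 < st) (hx : 0 ≤ x) :
    ((x + st) / st).toNat = (x / st).toNat + 1 := by
  have h1 : (x + st) / st = x / st + 1 := by
    have := Int.add_mul_ediv_right x 1 hst.ne'
    simpa using this
  have h2 : 0 ≤ x / st := Int.ediv_nonneg hx hst.le
  omega

lemma nbPyRange_cons_pos (a b st : Int) (hst : 0 < st) (h : a < b) :
    PySem.List.pyRange a b st = a :: PySem.List.pyRange (a + st) b st := by
  simp only [PySem.List.pyRange, if_neg hst.ne', if_pos hst, if_pos h]
  by_cases h2 : a + st < b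
  · rw [if_pos h2]
    have hc : ((b - a + st - 1) / st).toNat = ((b - (a + st) + st - 1) / st).toNat + 1 := by
      have he : b - a + st - 1 = (b - (a + st) + st - 1) + st := by ring
      rw [he]
      exact nbCount_succ _ st hst (by omega)
    rw [hc, List.range_succ_eq_map]
    simp only [List.map_cons, List.map_map]
    congr 1
    · simp
    · apply List.map_congr_left
      intro k _
      simp only [Function.comp_apply]
      push_cast
      ring
  · rw [if_neg h2]
    have hc : (b - a + st - 1) / st = 1 := by
      rw [← PySem.Int.floordiv_eq_ediv_of_pos hst, PySem.Int.floordiv_eq_iff_of_pos hst]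
      constructor <;> omega
    rw [hc]
    simp [List.range_succ]

lemma nbPyRange_cons_neg (a b st : Int) (hst : st < 0) (h : b < a) :
    PySem.List.pyRange a b st = a :: PySem.List.pyRange (a + st) b st := by
  simp only [PySem.List.pyRange, if_neg hst.ne, if_neg (not_lt.mpr hst.le), if_pos h]
  by_cases h2 : b < a + st
  · rw [if_pos h2]
    have hc : ((a - b + -st - 1) / (-st)).toNat = ((a + st - b + -st - 1) / (-st)).toNat + 1 := by
      have he : a - b + -st - 1 = (a + st - b + -st - 1) + (-st) := by ring
      rw [he]
      exact nbCount_succ _ (-st) (by omega) (by omega)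
    rw [hc, List.range_succ_eq_map]
    simp only [List.map_cons, List.map_map]
    congr 1
    · simp
    · apply List.map_congr_left
      intro k _
      simp only [Function.comp_apply]
      push_cast
      ring
  · rw [if_neg h2]
    have hpos : (0 : Int) < -st := by omega
    have hc : (a - b + -st - 1) / (-st) = 1 := by
      rw [← PySem.Int.floordiv_eq_ediv_of_pos hpos, PySem.Int.floordiv_eq_iff_of_pos hpos]
      constructor <;> omega
    rw [hc]
    simp [List.range_succ]

lemma nbVisit_eq_range (s : List Char) (d : Int) (hd : d ≠ 0) :
    ∀ (fuel : Nat) (idx : Int),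
      (0 < d → 0 ≤ idx ∧ (s.length : Int) - idx ≤ fuel) →
      (d < 0 → idx < (s.length : Int) ∧ idx + 1 ≤ fuel) →
      nbVisit s d fuel idx =
        (PySem.List.pyRange idx (if 0 < d then (s.length : Int) else -1) d).filterMap
          (fun i => PySem.List.pyGet? s i) := by
  intro fuel
  induction fuel with
  | zero =>
    intro idx hp hn
    rcases lt_or_gt_of_ne hd with hneg | hpos
    · have := hn hneg
      rw [if_neg (not_lt.mpr hneg.le), nbPyRange_nil_neg _ _ _ hneg (by omega)]
      simp [nbVisit]
    · have := hp hpos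
      rw [if_pos hpos, nbPyRange_nil_pos _ _ _ hpos (by omega)]
      simp [nbVisit]
  | succ fuel ih =>
    intro idx hp hn
    by_cases h : 0 ≤ idx ∧ idx < (s.length : Int)
    · have hidx : idx.toNat < s.length := by omega
      have hg : PySem.List.pyGet? s idx = some s[idx.toNat] := by
        simp only [PySem.List.pyGet?, PySem.List.pyIdx?]
        rw [if_pos h.1, if_pos h.2]
        simp [List.getElem?_eq_getElem hidx]
      have hcons :
          PySem.List.pyRange idx (if 0 < d then (s.length : Int) else -1) d =
            idx :: PySem.List.pyRange (idx + d) (if 0 < d then (s.length : Int) else -1) d := by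
        rcases lt_or_gt_of_ne hd with hneg | hpos
        · rw [if_neg (not_lt.mpr hneg.le)]
          exact nbPyRange_cons_neg _ _ _ hneg (by omega)
        · rw [if_pos hpos]
          exact nbPyRange_cons_pos _ _ _ hpos (by omega)
      rw [hcons]
      simp only [nbVisit, if_pos h, hg, List.filterMap_cons]
      rw [ih (idx + d) (fun hpos => ⟨by omega, by omega⟩) (fun hneg => ⟨by omega, by omega⟩)]
    · simp only [nbVisit, if_neg h]
      rcases lt_or_gt_of_ne hd with hneg | hpos
      · have := hn hneg
        rw [if_neg (not_lt.mpr hneg.le), nbPyRange_nil_neg _ _ _ hneg (by omega)]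
        simp
      · have := hp hpos
        rw [if_pos hpos, nbPyRange_nil_pos _ _ _ hpos (by omega)]
        simp
-- helper facts about the classifiers
lemma nb_isspace_space : PySem.Chars.isspace ' ' = true := by decide

lemma nb_isspace_of_alnum (c : Char) (h : nbIsAlnum c = true) : PySem.Chars.isspace c = false := by
  simp only [nbIsAlnum, Bool.or_eq_true, Bool.and_eq_true, decide_eq_true_eq] at h
  simp only [PySem.Chars.isspace]
  simp only [Bool.or_eq_false_iff, Bool.and_eq_false_iff, decide_eq_false_iff_not, not_le]
  omega

lemma nb_not_ws_of_alnum (c : Char) (h : nbIsAlnum c = true) : nbIsWs c = false := by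
  simp only [nbIsAlnum, Bool.or_eq_true, Bool.and_eq_true, decide_eq_true_eq] at h
  simp only [nbIsWs, Bool.or_eq_false_iff, beq_eq_false_iff_ne, ne_eq]
  omega

-- split₀.go over the classified characters computes nbW
lemma nbGo_eq (cs : List Char) :
    ∀ (cur : List Char) (acc : List (List Char)),
      PySem.Chars.split₀.go (cs.flatMap nbClassify) cur acc = acc.reverse ++ nbW cur.reverse cs := by
  induction cs with
  | nil =>
    intro cur acc
    by_cases h : cur = []
    · simp [h, PySem.Chars.split₀.go, nbW]
    · simp [PySem.Chars.split₀.go, nbW, h, List.isEmpty_iff]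
  | cons c cs ih =>
    intro cur acc
    by_cases hal : nbIsAlnum c
    · have hs := nb_isspace_of_alnum c hal
      simp only [List.flatMap_cons, nbClassify, if_pos hal, List.singleton_append,
        PySem.Chars.split₀.go, hs, Bool.false_eq_true, if_false]
      rw [ih (c :: cur) acc, nbW, if_neg (by simp [nb_not_ws_of_alnum c hal]), if_pos hal]
      simp
    · by_cases hws : nbIsWs c
      · simp only [List.flatMap_cons, nbClassify, if_neg hal, if_pos hws, List.singleton_append,
          PySem.Chars.split₀.go, nb_isspace_space, if_true]
        by_cases h : cur = []
        · rw [if_pos (by simp [h]), ih [] acc]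
          simp [nbW, hws, h]
        · rw [if_neg (by simp [List.isEmpty_iff, h]), ih [] (cur.reverse :: acc)]
          rw [nbW, if_pos hws, if_neg (by simp [h])]
          simp
      · simp only [List.flatMap_cons, nbClassify, if_neg hal, if_neg hws, List.nil_append]
        rw [ih cur acc, nbW, if_neg hws, if_neg hal]

-- A's scan produces the first 10 words, finished according to the direction
lemma nbProc_eq_take (d : Int) (cs : List Char) :
    ∀ (curr : List Char) (results : List String), results.length < 10 →
      nbProc d cs curr results =
        results ++ ((nbW curr cs).take (10 - results.length)).map (nbFin d) := by
  induction cs with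
  | nil =>
    intro curr results hlt
    by_cases h : curr = []
    · simp [nbProc, nbFinish, nbW, h]
    · have h1 : 0 < curr.length := List.length_pos_iff.mpr h
      have hcond : 0 < curr.length ∧ results.length < 10 := And.intro h1 hlt
      simp only [nbProc, nbFinish, if_pos hcond, nbW, if_neg h]
      rw [List.take_of_length_le (by simp only [List.length_cons, List.length_nil]; omega)]
      simp [nbFin]
  | cons c cs ih =>
    intro curr results hlt
    by_cases hws : nbIsWs c
    · by_cases hc : 0 < curr.length
      · have hne : curr ≠ [] := by intro h; rw [h] at hc; simp at hc
        simp only [nbProc, if_pos hws, if_pos hc, nbW, if_neg hne]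
        have hlen : (results ++ [String.mk (if d = -1 then curr.reverse else curr)]).length
            = results.length + 1 := by simp
        by_cases hb : 10 ≤ results.length + 1
        · rw [if_pos (by rw [hlen]; exact hb)]
          have h10 : 10 - results.length = 1 := by omega
          rw [h10]
          rw [show (1 : Nat) = 0 + 1 from rfl, List.take_succ_cons, List.take_zero]
          simp [nbFin]
        · rw [if_neg (by rw [hlen]; exact hb)]
          rw [ih [] _ (by rw [hlen]; omega)]
          rw [hlen]
          have h10 : 10 - results.length = (10 - (results.length + 1)) + 1 := by omega
          rw [h10, List.take_succ_cons, List.map_cons, List.append_assoc, List.singleton_append]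
          simp [nbFin]
      · have h0 : curr = [] := by
          cases curr with
          | nil => rfl
          | cons x xs => simp at hc
        subst h0
        simp only [nbProc, nbW, if_pos hws, List.length_nil, lt_self_iff_false, if_false,
          reduceIte]
        exact ih [] results hlt
    · by_cases hal : nbIsAlnum c
      · simp only [nbProc, nbW, if_neg hws, if_pos hal]
        exact ih (curr ++ [c]) results hlt
      · simp only [nbProc, nbW, if_neg hws, if_neg hal]
        exact ih curr results hlt

-- B's final conditional is a single map of nbFin
lemma nbAlt_map (d : Int) (ws : List (List Char)) :
    (if d = -1 then ws.map (fun w => String.mk w.reverse) else ws.map String.mk)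
      = ws.map (nbFin d) := by
  by_cases h : d = -1
  · rw [if_pos h]; apply List.map_congr_left; intro w _; simp [nbFin, h]
  · rw [if_neg h]; apply List.map_congr_left; intro w _; simp [nbFin, h]

-- ===== VERDICT (by name: the statement is the Claim_ definition above) =====
theorem neighbor_strings_spec : Claim_equal_neighbor_strings := by
  intro original idx direction hdom hpre
  unfold Spec_neighbor_strings neighbor_strings neighbor_strings_alt
  set s := original.toList with hs
  by_cases hin : 0 ≤ idx ∧ idx < (s.length : Int)
  · have hd : direction ≠ 0 := fun h => (hpre h) hin
    rw [if_pos hin]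
    rw [nbLoop_eq_nbProc]
    rw [nbVisit_eq_range s direction hd (s.length + 1) idx
        (fun _ => ⟨hin.1, by omega⟩) (fun _ => ⟨hin.2, by omega⟩)]
    set seg := (PySem.List.pyRange idx (if 0 < direction then (s.length : Int) else -1) direction).filterMap
        (fun i => PySem.List.pyGet? s i) with hseg
    rw [nbProc_eq_take direction seg [] [] (by simp)]
    simp only [List.nil_append, List.length_nil, Nat.sub_zero]
    rw [PySem.Chars.split₀, nbGo_eq seg [] []]
    simp only [List.reverse_nil, List.nil_append]
    rw [nbAlt_map]
  · rw [if_neg hin]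
    show nbLoop s direction (s.length + 1) idx [] [] = []
    simp [nbLoop, if_neg hin, nbFinish]
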